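-- pv_equiv track=rewrite | github.com/scbdatax/genai-datax-language-confusion-and-multilingual-performance | src/utils/misc_functions.py | revise_answer
-- ===== SOURCE A (Python) =====
-- def revise_answer(x: str) -> str:
--     x = x.strip()
--     choices = ["A", "B", "C", "D", "E"]
--     for idx, choice in enumerate(choices):
--         x = x.replace(str(idx), choice)
--
--         # just contains the answer at anywhere in the response
--         if choice in x:
--             return choice
--
--     return x
-- ===== SOURCE B (Python) =====
-- def revise_answer(x: str) -> str:
--     s = x.strip()
--     present = set()
--     for ch in s:
--         if ch in "ABCDE":
--             present.add(ord(ch) - ord("A"))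
--         elif ch in "01234":
--             present.add(ord(ch) - ord("0"))
--     for i in range(5):
--         if i in present:
--             return "ABCDE"[i]
--     table = {"0": "A", "1": "B", "2": "C", "3": "D", "4": "E"}
--     return "".join(table.get(c, c) for c in s)
-- ===== Notes on version B (the rewrite author's own statement) =====
-- stated objective: alternative
-- what changed: Replaces the five sequential whole-string replace()+membership scans with a single pass over the stripped string that collects the set of present choice indices, then a first-index lookup, with one translate-style join as the fallback.
import Mathlib
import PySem

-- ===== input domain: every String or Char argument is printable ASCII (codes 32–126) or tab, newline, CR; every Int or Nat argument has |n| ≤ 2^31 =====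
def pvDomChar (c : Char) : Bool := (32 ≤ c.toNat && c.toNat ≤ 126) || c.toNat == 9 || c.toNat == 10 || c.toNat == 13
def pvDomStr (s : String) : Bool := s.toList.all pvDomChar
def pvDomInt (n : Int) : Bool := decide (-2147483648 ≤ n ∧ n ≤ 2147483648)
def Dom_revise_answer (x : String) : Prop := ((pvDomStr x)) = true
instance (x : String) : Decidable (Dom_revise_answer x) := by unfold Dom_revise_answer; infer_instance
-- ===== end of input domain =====

-- B replaces A's five sequential whole-string replace()+membership scans by one pass that
-- collects the set of present choice indices, then a first-index lookup (objective: alternative).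

-- ===== PORT A =====
def raLoop : List (Int × String) → String → String
  | [], x => x
  | (idx, choice) :: rest, x =>
    let x' := PySem.Str.replace x (PySem.Int.toStr idx) choice
    if PySem.Str.isIn choice x' then choice else raLoop rest x'

def revise_answer (x : String) : String :=
  raLoop (PySem.List.enumerate ["A", "B", "C", "D", "E"]) (PySem.Str.strip x)

-- ===== PORT B =====
def raLetters : List Char := ['A', 'B', 'C', 'D', 'E']
def raDigits : List Char := ['0', '1', '2', '3', '4']

-- body of B's single collecting pass: ord(ch) - ord('A') = ch.toNat - 65, ord('0') = 48
def raStep (present : PySem.Set Int) (ch : Char) : PySem.Set Int :=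
  if PySem.Chars.isIn [ch] raLetters then
    PySem.Set.add present ((ch.toNat : Int) - 65)
  else if PySem.Chars.isIn [ch] raDigits then
    PySem.Set.add present ((ch.toNat : Int) - 48)
  else present

def raBuild (l : List Char) : PySem.Set Int := l.foldl raStep PySem.Set.empty

-- "ABCDE"[i]: i is always 0..4 here, so pyGet? is always `some` and Option.toList is one char
def raPick (present : PySem.Set Int) : List Int → Option String
  | [] => none
  | i :: rest =>
    if PySem.Set.contains present i then
      some (String.ofList (PySem.List.pyGet? raLetters i).toList)
    else raPick present rest

def raTable : PySem.Dict Char Char :=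
  PySem.Dict.ofList [('0', 'A'), ('1', 'B'), ('2', 'C'), ('3', 'D'), ('4', 'E')]

def revise_answer_alt (x : String) : String :=
  let s := PySem.Str.strip x
  let present := raBuild s.toList
  match raPick present (PySem.List.pyRange 0 5 1) with
  | some r => r
  | none => String.ofList (s.toList.map (fun c => PySem.Dict.getD raTable c c))

-- ===== PRECONDITION & SPEC =====
def Spec_revise_answer (x : String) (out : String) : Prop := out = revise_answer_alt x
instance (x : String) (out : String) : Decidable (Spec_revise_answer x out) := by unfold Spec_revise_answer; infer_instance

-- ===== CLAIM (what is proved, stated in full; the proofs are below) =====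
def Claim_equal_revise_answer : Prop := ∀ (x : String), Dom_revise_answer x → Spec_revise_answer x (revise_answer x)

-- ===== LEMMAS AND PROOFS =====

-- the single-character substitution A's replace() effects, and the common answer shape
def raUpd (a b : Char) : Char → Char := fun c => if c = a then b else c

def raTr (c : Char) : Char :=
  if c = '0' then 'A' else if c = '1' then 'B' else if c = '2' then 'C'
  else if c = '3' then 'D' else if c = '4' then 'E' else c

def raSpec (l : List Char) : String :=
  if 'A' ∈ l ∨ '0' ∈ l then "A"
  else if 'B' ∈ l ∨ '1' ∈ l then "B"
  else if 'C' ∈ l ∨ '2' ∈ l then "C"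
  else if 'D' ∈ l ∨ '3' ∈ l then "D"
  else if 'E' ∈ l ∨ '4' ∈ l then "E"
  else String.ofList (l.map raTr)

lemma replace_go_single (a b : Char) :
    ∀ (l acc : List Char) (fuel : Nat), l.length ≤ fuel →
      PySem.Chars.replace.go [a] [b] fuel l acc = acc.reverse ++ l.map (raUpd a b) := by
  intro l
  induction l with
  | nil => intro acc fuel _; cases fuel <;> simp [PySem.Chars.replace.go]
  | cons c t ih =>
    intro acc fuel hle
    cases fuel with
    | zero => simp at hle
    | succ n =>
      simp only [PySem.Chars.replace.go, List.isPrefixOf]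
      by_cases h : a = c
      · subst h
        simp only [BEq.rfl, Bool.true_and, if_pos]
        rw [show List.drop [a].length (a :: t) = t from rfl,
          ih _ n (by simpa using hle)]
        simp [raUpd]
      · rw [if_neg (by simp [h]), ih _ n (by simpa using hle)]
        have hc : raUpd a b c = c := by
          simp only [raUpd, if_neg (fun hh : c = a => h hh.symm)]
        simp [hc]

lemma replace_single (cs : List Char) (a b : Char) :
    PySem.Chars.replace cs [a] [b] = cs.map (raUpd a b) := by
  rw [PySem.Chars.replace]
  simp [replace_go_single a b cs [] cs.length le_rfl]

lemma str_replace_single (s : String) (a b : Char) :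
    PySem.Str.replace s (String.ofList [a]) (String.ofList [b]) =
      String.ofList (s.toList.map (raUpd a b)) := by
  apply String.toList_inj.mp
  rw [PySem.Str.toList_replace]
  simp [replace_single]

lemma mem_map_upd_self (l : List Char) (a b : Char) (h : b ≠ a) :
    b ∈ l.map (raUpd a b) ↔ b ∈ l ∨ a ∈ l := by
  simp only [List.mem_map, raUpd]
  constructor
  · rintro ⟨c, hc, hcb⟩
    by_cases hca : c = a
    · subst hca; right; exact hc
    · left; rw [if_neg hca] at hcb; rwa [hcb] at hc
  · rintro (hb | ha)
    · exact ⟨b, hb, by rw [if_neg h]⟩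
    · exact ⟨a, ha, by rw [if_pos rfl]⟩

lemma mem_map_upd_other (l : List Char) (a b d : Char) (h1 : d ≠ a) (h2 : d ≠ b) :
    d ∈ l.map (raUpd a b) ↔ d ∈ l := by
  simp only [List.mem_map, raUpd]
  constructor
  · rintro ⟨c, hc, hcd⟩
    by_cases hca : c = a
    · rw [if_pos hca] at hcd; exact absurd hcd.symm h2
    · rw [if_neg hca] at hcd; rwa [hcd] at hc
  · intro hd; exact ⟨d, hd, by rw [if_neg h1]⟩

lemma isIn_single (c : Char) (m : List Char) :
    PySem.Chars.isIn [c] m = true ↔ c ∈ m := by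
  rw [PySem.Chars.isIn_iff_infix]; exact List.singleton_infix_iff c m

lemma str_isIn_single (c : Char) (m : List Char) :
    PySem.Str.isIn (String.ofList [c]) (String.ofList m) = true ↔ c ∈ m := by
  rw [PySem.Str.isIn_iff_infix]
  simp [List.singleton_infix_iff]

lemma A_eq (s : String) :
    raLoop (PySem.List.enumerate ["A", "B", "C", "D", "E"]) s = raSpec s.toList := by
  have henum : PySem.List.enumerate ["A", "B", "C", "D", "E"] =
      [((0:Int),"A"),(1,"B"),(2,"C"),(3,"D"),(4,"E")] := by decide
  have h0 : PySem.Int.toStr 0 = String.ofList ['0'] := by decide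
  have h1 : PySem.Int.toStr 1 = String.ofList ['1'] := by decide
  have h2 : PySem.Int.toStr 2 = String.ofList ['2'] := by decide
  have h3 : PySem.Int.toStr 3 = String.ofList ['3'] := by decide
  have h4 : PySem.Int.toStr 4 = String.ofList ['4'] := by decide
  have hA : ("A" : String) = String.ofList ['A'] := by decide
  have hB : ("B" : String) = String.ofList ['B'] := by decide
  have hC : ("C" : String) = String.ofList ['C'] := by decide
  have hD : ("D" : String) = String.ofList ['D'] := by decide
  have hE : ("E" : String) = String.ofList ['E'] := by decide
  set l := s.toList with hl
  have hs : s = String.ofList l := by rw [hl, String.ofList_toList]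
  rw [henum, hs]
  simp only [raLoop, h0, h1, h2, h3, h4, hA, hB, hC, hD, hE, str_replace_single,
    String.toList_ofList]
  have c1 : (PySem.Str.isIn (String.ofList ['A'])
      (String.ofList (l.map (raUpd '0' 'A'))) = true) ↔ ('A' ∈ l ∨ '0' ∈ l) := by
    rw [str_isIn_single]; exact mem_map_upd_self _ _ _ (by decide)
  have c2 : (PySem.Str.isIn (String.ofList ['B'])
      (String.ofList ((l.map (raUpd '0' 'A')).map (raUpd '1' 'B'))) = true) ↔
      ('B' ∈ l ∨ '1' ∈ l) := by
    rw [str_isIn_single, mem_map_upd_self _ _ _ (by decide),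
      mem_map_upd_other _ _ _ _ (by decide) (by decide),
      mem_map_upd_other _ _ _ _ (by decide) (by decide)]
  have c3 : (PySem.Str.isIn (String.ofList ['C'])
      (String.ofList (((l.map (raUpd '0' 'A')).map (raUpd '1' 'B')).map (raUpd '2' 'C'))) = true) ↔
      ('C' ∈ l ∨ '2' ∈ l) := by
    rw [str_isIn_single, mem_map_upd_self _ _ _ (by decide),
      mem_map_upd_other _ _ _ _ (by decide) (by decide),
      mem_map_upd_other _ _ _ _ (by decide) (by decide),
      mem_map_upd_other _ _ _ _ (by decide) (by decide),
      mem_map_upd_other _ _ _ _ (by decide) (by decide)]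
  have c4 : (PySem.Str.isIn (String.ofList ['D'])
      (String.ofList ((((l.map (raUpd '0' 'A')).map (raUpd '1' 'B')).map (raUpd '2' 'C')).map (raUpd '3' 'D'))) = true) ↔
      ('D' ∈ l ∨ '3' ∈ l) := by
    rw [str_isIn_single, mem_map_upd_self _ _ _ (by decide),
      mem_map_upd_other _ _ _ _ (by decide) (by decide),
      mem_map_upd_other _ _ _ _ (by decide) (by decide),
      mem_map_upd_other _ _ _ _ (by decide) (by decide),
      mem_map_upd_other _ _ _ _ (by decide) (by decide),
      mem_map_upd_other _ _ _ _ (by decide) (by decide),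
      mem_map_upd_other _ _ _ _ (by decide) (by decide)]
  have c5 : (PySem.Str.isIn (String.ofList ['E'])
      (String.ofList (((((l.map (raUpd '0' 'A')).map (raUpd '1' 'B')).map (raUpd '2' 'C')).map (raUpd '3' 'D')).map (raUpd '4' 'E'))) = true) ↔
      ('E' ∈ l ∨ '4' ∈ l) := by
    rw [str_isIn_single, mem_map_upd_self _ _ _ (by decide),
      mem_map_upd_other _ _ _ _ (by decide) (by decide),
      mem_map_upd_other _ _ _ _ (by decide) (by decide),
      mem_map_upd_other _ _ _ _ (by decide) (by decide),
      mem_map_upd_other _ _ _ _ (by decide) (by decide),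
      mem_map_upd_other _ _ _ _ (by decide) (by decide),
      mem_map_upd_other _ _ _ _ (by decide) (by decide),
      mem_map_upd_other _ _ _ _ (by decide) (by decide),
      mem_map_upd_other _ _ _ _ (by decide) (by decide)]
  have cfin : ((((l.map (raUpd '0' 'A')).map (raUpd '1' 'B')).map (raUpd '2' 'C')).map (raUpd '3' 'D')).map (raUpd '4' 'E') = l.map raTr := by
    simp only [List.map_map]
    apply List.map_congr_left
    intro c _
    by_cases e0 : c = '0' <;> by_cases e1 : c = '1' <;> by_cases e2 : c = '2' <;>
      by_cases e3 : c = '3' <;> by_cases e4 : c = '4' <;>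
      simp_all [raUpd, raTr, Function.comp]
  rw [raSpec, hA, hB, hC, hD, hE]
  simp only [c1, c2, c3, c4, c5]
  simp only [cfin]

def raHit (c : Char) (i : Int) : Prop :=
  (PySem.Chars.isIn [c] raLetters = true ∧ i = (c.toNat : Int) - 65) ∨
  (PySem.Chars.isIn [c] raLetters = false ∧ PySem.Chars.isIn [c] raDigits = true ∧
    i = (c.toNat : Int) - 48)

lemma raStep_mem (acc : PySem.Set Int) (c : Char) (i : Int) :
    i ∈ raStep acc c ↔ i ∈ acc ∨ raHit c i := by
  unfold raStep raHit
  by_cases h1 : PySem.Chars.isIn [c] raLetters = true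
  · simp [h1, PySem.Set.mem_add]
  · rw [if_neg h1]
    by_cases h2 : PySem.Chars.isIn [c] raDigits = true
    · simp [h1, h2, PySem.Set.mem_add, eq_comm (a := i)]
    · simp [h1, h2]

lemma raBuild_go (i : Int) :
    ∀ (l : List Char) (acc : PySem.Set Int),
      i ∈ l.foldl raStep acc ↔ i ∈ acc ∨ ∃ c ∈ l, raHit c i := by
  intro l
  induction l with
  | nil => intro acc; simp
  | cons c t ih =>
    intro acc
    rw [List.foldl_cons, ih, raStep_mem]
    constructor
    · rintro ((h | h) | ⟨d, hd, h⟩)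
      · exact Or.inl h
      · exact Or.inr ⟨c, List.mem_cons_self, h⟩
      · exact Or.inr ⟨d, List.mem_cons_of_mem _ hd, h⟩
    · rintro (h | ⟨d, hd, h⟩)
      · exact Or.inl (Or.inl h)
      · rcases List.mem_cons.mp hd with rfl | hd'
        · exact Or.inl (Or.inr h)
        · exact Or.inr ⟨d, hd', h⟩

lemma raBuild_spec (l : List Char) (i : Int) :
    i ∈ raBuild l ↔ ∃ c ∈ l, raHit c i := by
  rw [raBuild, raBuild_go]
  simp [PySem.Set.empty]

lemma raHit_iff0 (c : Char) : raHit c 0 ↔ c = 'A' ∨ c = '0' := by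
  constructor
  · rintro (⟨hL, hi⟩ | ⟨hnL, hD, hi⟩)
    · rw [isIn_single] at hL; simp only [raLetters, List.mem_cons, List.not_mem_nil, or_false] at hL
      rcases hL with h|h|h|h|h <;> subst h <;>
        first | (left; rfl) | (exact absurd hi (by decide))
    · rw [isIn_single] at hD; simp only [raDigits, List.mem_cons, List.not_mem_nil, or_false] at hD
      rcases hD with h|h|h|h|h <;> subst h <;>
        first | (right; rfl) | (exact absurd hi (by decide))
  · rintro (rfl | rfl)
    · exact Or.inl ⟨by decide, by decide⟩
    · exact Or.inr ⟨by decide, by decide, by decide⟩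

lemma exists_mem_eq_or (l : List Char) (a b : Char) :
    (∃ c ∈ l, c = a ∨ c = b) ↔ a ∈ l ∨ b ∈ l := by
  constructor
  · rintro ⟨c, hc, rfl | rfl⟩
    exacts [Or.inl hc, Or.inr hc]
  · rintro (h | h)
    exacts [⟨a, h, Or.inl rfl⟩, ⟨b, h, Or.inr rfl⟩]

lemma raHit_iff1 (c : Char) : raHit c 1 ↔ c = 'B' ∨ c = '1' := by
  constructor
  · rintro (⟨hL, hi⟩ | ⟨hnL, hD, hi⟩)
    · rw [isIn_single] at hL; simp only [raLetters, List.mem_cons, List.not_mem_nil, or_false] at hL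
      rcases hL with h|h|h|h|h <;> subst h <;>
        first | (left; rfl) | (exact absurd hi (by decide))
    · rw [isIn_single] at hD; simp only [raDigits, List.mem_cons, List.not_mem_nil, or_false] at hD
      rcases hD with h|h|h|h|h <;> subst h <;>
        first | (right; rfl) | (exact absurd hi (by decide))
  · rintro (rfl | rfl)
    · exact Or.inl ⟨by decide, by decide⟩
    · exact Or.inr ⟨by decide, by decide, by decide⟩

lemma raHit_iff2 (c : Char) : raHit c 2 ↔ c = 'C' ∨ c = '2' := by
  constructor
  · rintro (⟨hL, hi⟩ | ⟨hnL, hD, hi⟩)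
    · rw [isIn_single] at hL; simp only [raLetters, List.mem_cons, List.not_mem_nil, or_false] at hL
      rcases hL with h|h|h|h|h <;> subst h <;>
        first | (left; rfl) | (exact absurd hi (by decide))
    · rw [isIn_single] at hD; simp only [raDigits, List.mem_cons, List.not_mem_nil, or_false] at hD
      rcases hD with h|h|h|h|h <;> subst h <;>
        first | (right; rfl) | (exact absurd hi (by decide))
  · rintro (rfl | rfl)
    · exact Or.inl ⟨by decide, by decide⟩
    · exact Or.inr ⟨by decide, by decide, by decide⟩

lemma raHit_iff3 (c : Char) : raHit c 3 ↔ c = 'D' ∨ c = '3' := by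
  constructor
  · rintro (⟨hL, hi⟩ | ⟨hnL, hD, hi⟩)
    · rw [isIn_single] at hL; simp only [raLetters, List.mem_cons, List.not_mem_nil, or_false] at hL
      rcases hL with h|h|h|h|h <;> subst h <;>
        first | (left; rfl) | (exact absurd hi (by decide))
    · rw [isIn_single] at hD; simp only [raDigits, List.mem_cons, List.not_mem_nil, or_false] at hD
      rcases hD with h|h|h|h|h <;> subst h <;>
        first | (right; rfl) | (exact absurd hi (by decide))
  · rintro (rfl | rfl)
    · exact Or.inl ⟨by decide, by decide⟩
    · exact Or.inr ⟨by decide, by decide, by decide⟩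

lemma raHit_iff4 (c : Char) : raHit c 4 ↔ c = 'E' ∨ c = '4' := by
  constructor
  · rintro (⟨hL, hi⟩ | ⟨hnL, hD, hi⟩)
    · rw [isIn_single] at hL; simp only [raLetters, List.mem_cons, List.not_mem_nil, or_false] at hL
      rcases hL with h|h|h|h|h <;> subst h <;>
        first | (left; rfl) | (exact absurd hi (by decide))
    · rw [isIn_single] at hD; simp only [raDigits, List.mem_cons, List.not_mem_nil, or_false] at hD
      rcases hD with h|h|h|h|h <;> subst h <;>
        first | (right; rfl) | (exact absurd hi (by decide))
  · rintro (rfl | rfl)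
    · exact Or.inl ⟨by decide, by decide⟩
    · exact Or.inr ⟨by decide, by decide, by decide⟩

lemma raTable_getD (c : Char) : PySem.Dict.getD raTable c c = raTr c := by
  by_cases e0 : c = '0'
  · subst e0; decide
  by_cases e1 : c = '1'
  · subst e1; decide
  by_cases e2 : c = '2'
  · subst e2; decide
  by_cases e3 : c = '3'
  · subst e3; decide
  by_cases e4 : c = '4'
  · subst e4; decide
  have hitems : raTable.items = [('0','A'),('1','B'),('2','C'),('3','D'),('4','E')] := by decide
  have b0 : ('0' == c) = false := beq_eq_false_iff_ne.mpr (Ne.symm e0)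
  have b1 : ('1' == c) = false := beq_eq_false_iff_ne.mpr (Ne.symm e1)
  have b2 : ('2' == c) = false := beq_eq_false_iff_ne.mpr (Ne.symm e2)
  have b3 : ('3' == c) = false := beq_eq_false_iff_ne.mpr (Ne.symm e3)
  have b4 : ('4' == c) = false := beq_eq_false_iff_ne.mpr (Ne.symm e4)
  simp [PySem.Dict.getD, PySem.Dict.get?, hitems, List.find?, raTr,
    b0, b1, b2, b3, b4, e0, e1, e2, e3, e4]

lemma B_core (s : String) :
    (match raPick (raBuild s.toList) (PySem.List.pyRange 0 5 1) with
     | some r => r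
     | none => String.ofList (s.toList.map (fun c => PySem.Dict.getD raTable c c))) =
      raSpec s.toList := by
  have hrange : PySem.List.pyRange 0 5 1 = [0, 1, 2, 3, 4] := by decide
  set l := s.toList with hl
  have k0 : (PySem.Set.contains (raBuild l) 0 = true) ↔ ('A' ∈ l ∨ '0' ∈ l) := by
    rw [PySem.Set.contains_iff, raBuild_spec]
    simp only [raHit_iff0]; exact exists_mem_eq_or l 'A' '0'
  have k1 : (PySem.Set.contains (raBuild l) 1 = true) ↔ ('B' ∈ l ∨ '1' ∈ l) := by
    rw [PySem.Set.contains_iff, raBuild_spec]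
    simp only [raHit_iff1]; exact exists_mem_eq_or l 'B' '1'
  have k2 : (PySem.Set.contains (raBuild l) 2 = true) ↔ ('C' ∈ l ∨ '2' ∈ l) := by
    rw [PySem.Set.contains_iff, raBuild_spec]
    simp only [raHit_iff2]; exact exists_mem_eq_or l 'C' '2'
  have k3 : (PySem.Set.contains (raBuild l) 3 = true) ↔ ('D' ∈ l ∨ '3' ∈ l) := by
    rw [PySem.Set.contains_iff, raBuild_spec]
    simp only [raHit_iff3]; exact exists_mem_eq_or l 'D' '3'
  have k4 : (PySem.Set.contains (raBuild l) 4 = true) ↔ ('E' ∈ l ∨ '4' ∈ l) := by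
    rw [PySem.Set.contains_iff, raBuild_spec]
    simp only [raHit_iff4]; exact exists_mem_eq_or l 'E' '4'
  have hmap : l.map (fun c => PySem.Dict.getD raTable c c) = l.map raTr :=
    List.map_congr_left (fun c _ => raTable_getD c)
  rw [hrange]
  simp only [raPick, k0, k1, k2, k3, k4, hmap]
  rw [raSpec]
  split_ifs <;> simp_all <;> decide

-- ===== VERDICT (by name: the statement is the Claim_ definition above) =====
theorem revise_answer_spec : Claim_equal_revise_answer := by
  intro x _
  unfold Spec_revise_answer revise_answer revise_answer_alt
  rw [A_eq]
  exact (B_core (PySem.Str.strip x)).symm
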